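-- pv_equiv track=rewrite | github.com/Prashanth1998-18/raglint | app/services/chunker.py | _split_with_separator
-- ===== SOURCE A (Python) =====
-- def _split_with_separator(text: str, separator: str) -> list[str]:
--     """Split while retaining the separator on the preceding segment."""
--     if separator == "":
--         return list(text)
--
--     pieces: list[str] = []
--     search_start = 0
--
--     while True:
--         index = text.find(separator, search_start)
--         if index == -1:
--             break
--         end = index + len(separator)
--         pieces.append(text[search_start:end])
--         search_start = end
--
--     if search_start < len(text):
--         pieces.append(text[search_start:])
--
--     return pieces
-- ===== SOURCE B (Python) =====
-- def _split_with_separator(text: str, separator: str) -> list[str]: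
--     """Split while retaining the separator on the preceding segment."""
--     if separator == "":
--         return list(text)
--     parts = text.split(separator)
--     result = [part + separator for part in parts[:-1]]
--     if parts[-1]:
--         result.append(parts[-1])
--     return result
-- ===== Notes on version B (the rewrite author's own statement) =====
-- stated objective: simpler
-- what changed: Replaces A's incremental find-loop (tracking search_start and slicing out each piece) with a single str.split followed by a separate pass that re-attaches the separator to every part but the last and keeps the last part only if non-empty.
import Mathlib
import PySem

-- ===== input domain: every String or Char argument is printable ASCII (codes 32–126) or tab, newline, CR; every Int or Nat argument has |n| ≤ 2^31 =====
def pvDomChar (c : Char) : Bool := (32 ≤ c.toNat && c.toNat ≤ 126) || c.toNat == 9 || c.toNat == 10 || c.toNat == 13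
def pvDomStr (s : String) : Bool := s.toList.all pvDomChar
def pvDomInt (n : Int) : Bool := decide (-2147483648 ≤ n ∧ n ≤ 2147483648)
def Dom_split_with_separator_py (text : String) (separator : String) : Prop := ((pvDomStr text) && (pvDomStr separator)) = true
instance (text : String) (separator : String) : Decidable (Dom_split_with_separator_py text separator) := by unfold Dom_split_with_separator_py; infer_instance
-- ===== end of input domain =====

-- B replaces A's incremental find-loop by one str.split plus a pass that re-attaches the
-- separator to every part but the last (objective: simpler); return values proved equal on all inputs.

-- ===== PORT A =====
-- A's `while True` loop: state (pieces, search_start); the fuel only makes the recursion total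
-- (each iteration advances search_start by at least 1, so text.length + 1 iterations suffice).
def pvALoop (s sep : List Char) : Nat → List (List Char) → Int → List (List Char) × Int
  | 0, pieces, start => (pieces, start)
  | fuel+1, pieces, start =>
    let index := PySem.Chars.findFrom s sep start
    if index = -1 then (pieces, start)
    else
      let e := index + (sep.length : Int)
      pvALoop s sep fuel (pieces ++ [PySem.Chars.slice s (some start) (some e)]) e

def split_with_separator_py (text : String) (separator : String) : List String :=
  if separator = "" then text.toList.map (fun c => String.ofList [c])
  else
    let s := text.toList
    let res := pvALoop s separator.toList (s.length + 1) [] 0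
    let pieces := if res.2 < (s.length : Int) then res.1 ++ [PySem.Chars.slice s (some res.2) none] else res.1
    pieces.map String.ofList

-- ===== PORT B =====
def split_with_separator_py_alt (text : String) (separator : String) : List String :=
  if separator = "" then text.toList.map (fun c => String.ofList [c])
  else
    let parts := PySem.Chars.splitOn text.toList separator.toList
    let result := parts.dropLast.map (fun p => p ++ separator.toList) ++
      (match parts.getLast? with
       | none => []
       | some last => if last = [] then [] else [last])
    result.map String.ofList

-- ===== PRECONDITION & SPEC =====
def Spec_split_with_separator_py (text : String) (separator : String) (out : List String) : Prop := out = split_with_separator_py_alt text separator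
instance (text : String) (separator : String) (out : List String) : Decidable (Spec_split_with_separator_py text separator out) := by unfold Spec_split_with_separator_py; infer_instance

-- ===== CLAIM (what is proved, stated in full; the proofs are below) =====
def Claim_equal_split_with_separator_py : Prop := ∀ (text : String) (separator : String), Dom_split_with_separator_py text separator → Spec_split_with_separator_py text separator (split_with_separator_py text separator)

-- ===== LEMMAS AND PROOFS =====

def pvG (sep : List Char) (t : List Char) : List (List Char) :=
  if hsep : sep = [] then []
  else
    let i := PySem.Chars.find t sep
    if h : i = -1 then (if t = [] then [] else [t])
    else
      t.take (i.toNat + sep.length) :: pvG sep (t.drop (i.toNat + sep.length))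
termination_by t.length
decreasing_by
  have hinf : sep <:+: t := by
    exact (PySem.Chars.find_nonneg_iff t sep).mp (by
      have := PySem.Chars.neg_one_le_find t sep; omega)
  have ht : t ≠ [] := by
    intro hnil; subst hnil
    exact hsep (List.infix_nil.mp hinf)
  have h1 : 0 < sep.length := List.length_pos_iff.mpr hsep
  have h2 : 0 < t.length := List.length_pos_iff.mpr ht
  simp [List.length_drop]; omega

def pvMysplit (sep pre : List Char) : List Char → List (List Char)
  | [] => [pre]
  | c :: rest =>
    if sep ≠ [] ∧ sep.isPrefixOf (c :: rest) then
      pre :: pvMysplit sep [] ((c :: rest).drop sep.length)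
    else pvMysplit sep (pre ++ [c]) rest
termination_by l => l.length
decreasing_by
  · have : 0 < sep.length := List.length_pos_iff.mpr (by tauto)
    simp [List.length_drop]; omega
  · simp

def pvBuild (sep : List Char) (parts : List (List Char)) : List (List Char) :=
  parts.dropLast.map (fun p => p ++ sep) ++
    (match parts.getLast? with
     | none => []
     | some last => if last = [] then [] else [last])

theorem pvFindEq (t sep : List Char) (k : Nat) (h1 : sep <+: t.drop k)
    (h2 : ∀ i < k, ¬ sep <+: t.drop i) : PySem.Chars.find t sep = (k : Int) := by
  have hpos : 0 ≤ PySem.Chars.find t sep := by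
    rw [PySem.Chars.find_nonneg_iff]
    rw [← PySem.Chars.isIn_iff_infix, ← PySem.Chars.exists_prefix_drop_iff_isIn]
    exact ⟨k, h1⟩
  obtain ⟨hpre, hmin⟩ := PySem.Chars.find_spec hpos
  set m := (PySem.Chars.find t sep).toNat with hm
  have : m = k := by
    rcases Nat.lt_trichotomy m k with h | h | h
    · exact absurd hpre (h2 m h)
    · exact h
    · exact absurd h1 (hmin k h)
  omega

theorem pvFindCons (sep : List Char) (c : Char) (t : List Char) :
    PySem.Chars.find (c :: t) sep =
      if sep.isPrefixOf (c :: t) then 0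
      else if PySem.Chars.find t sep = -1 then -1 else PySem.Chars.find t sep + 1 := by
  split_ifs with hp hn
  · exact pvFindEq _ _ 0 (by simpa using List.isPrefixOf_iff_prefix.mp hp) (by omega)
  · rw [PySem.Chars.find_eq_neg_one_iff] at hn ⊢
    intro hinf
    obtain ⟨j, hj⟩ := (PySem.Chars.exists_prefix_drop_iff_isIn sep (c :: t)).mpr
      ((PySem.Chars.isIn_iff_infix sep (c :: t)).mpr hinf)
    match j, hj with
    | 0, hj => exact hp (List.isPrefixOf_iff_prefix.mpr (by simpa using hj))
    | j+1, hj =>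
      apply hn
      rw [← PySem.Chars.isIn_iff_infix, ← PySem.Chars.exists_prefix_drop_iff_isIn]
      exact ⟨j, by simpa using hj⟩
  · have hpos : 0 ≤ PySem.Chars.find t sep := by
      have := PySem.Chars.neg_one_le_find t sep; omega
    obtain ⟨hpre, hmin⟩ := PySem.Chars.find_spec hpos
    set m := (PySem.Chars.find t sep).toNat with hm
    have : PySem.Chars.find (c :: t) sep = ((m + 1 : Nat) : Int) := by
      apply pvFindEq
      · simpa using hpre
      · intro i hi
        match i with
        | 0 => exact fun hpp => hp (List.isPrefixOf_iff_prefix.mpr (by simpa using hpp))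
        | i+1 => exact fun hpp => hmin i (by omega) (by simpa using hpp)
    rw [this]; push_cast; omega

theorem pvMysplit_eq (sep : List Char) (hsep : sep ≠ []) (pre t : List Char) :
    pvMysplit sep pre t =
      if PySem.Chars.find t sep = -1 then [pre ++ t]
      else (pre ++ t.take (PySem.Chars.find t sep).toNat) ::
        pvMysplit sep [] (t.drop ((PySem.Chars.find t sep).toNat + sep.length)) := by
  induction t generalizing pre with
  | nil =>
    have hfind : PySem.Chars.find [] sep = -1 := by
      rw [PySem.Chars.find_eq_neg_one_iff]
      intro h; exact hsep (List.infix_nil.mp h)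
    simp [pvMysplit, hfind]
  | cons c rest ih =>
    rw [pvFindCons sep c rest]
    by_cases hp : sep.isPrefixOf (c :: rest)
    · simp only [if_pos hp]
      rw [pvMysplit]
      simp [hsep, hp]
    · simp only [if_neg hp]
      rw [pvMysplit]
      simp only [if_neg (by tauto : ¬ (sep ≠ [] ∧ sep.isPrefixOf (c :: rest)))]
      rw [ih (pre ++ [c])]
      by_cases hn : PySem.Chars.find rest sep = -1
      · simp [hn]
      · have hpos : 0 ≤ PySem.Chars.find rest sep := by
          have := PySem.Chars.neg_one_le_find rest sep; omega
        simp only [if_neg hn, if_neg (by omega : ¬ PySem.Chars.find rest sep + 1 = -1)]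
        have htn : (PySem.Chars.find rest sep + 1).toNat = (PySem.Chars.find rest sep).toNat + 1 := by omega
        rw [htn]
        simp [List.take_succ_cons, List.drop_succ_cons, Nat.add_right_comm]

theorem pvGo_eq (sep : List Char) (hsep : sep ≠ []) (fuel : Nat) (l cur : List Char)
    (acc : List (List Char)) (hf : l.length ≤ fuel) :
    PySem.Chars.splitOn.go sep fuel l cur acc = acc.reverse ++ pvMysplit sep cur.reverse l := by
  induction fuel generalizing l cur acc with
  | zero =>
    have hl : l = [] := by simpa using List.length_eq_zero_iff.mp (by omega)
    subst hl
    have hstep : PySem.Chars.splitOn.go sep 0 [] cur acc = ((cur.reverse ++ []) :: acc).reverse := rfl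
    rw [hstep]
    simp [pvMysplit]
  | succ f ih =>
    match l with
    | [] =>
      have hstep : PySem.Chars.splitOn.go sep (f+1) [] cur acc = (cur.reverse :: acc).reverse := rfl
      rw [hstep]
      simp [pvMysplit]
    | c :: rest =>
      have hstep : PySem.Chars.splitOn.go sep (f+1) (c :: rest) cur acc =
          (if sep.isPrefixOf (c :: rest) then
            PySem.Chars.splitOn.go sep f (List.drop sep.length (c :: rest)) [] (cur.reverse :: acc)
           else PySem.Chars.splitOn.go sep f rest (c :: cur) acc) := rfl
      rw [hstep]
      by_cases hp : sep.isPrefixOf (c :: rest)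
      · simp only [if_pos hp]
        rw [ih _ _ _ (by
          have : 0 < sep.length := List.length_pos_iff.mpr hsep
          simp at hf ⊢; omega)]
        rw [pvMysplit]
        simp [hsep, hp]
      · simp only [if_neg hp]
        rw [ih _ _ _ (by simp at hf ⊢; omega)]
        rw [pvMysplit]
        simp only [if_neg (by tauto : ¬ (sep ≠ [] ∧ sep.isPrefixOf (c :: rest)))]
        simp

theorem pvSplitOn_eq (sep : List Char) (hsep : sep ≠ []) (s : List Char) :
    PySem.Chars.splitOn s sep = pvMysplit sep [] s := by
  rw [PySem.Chars.splitOn, pvGo_eq sep hsep _ _ _ _ (by omega)]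
  simp

theorem pvMysplit_ne_nil (sep pre l : List Char) : pvMysplit sep pre l ≠ [] := by
  induction pre, l using pvMysplit.induct sep with
  | case1 => simp [pvMysplit]
  | case2 pre c rest h ih => rw [pvMysplit, if_pos h]; simp
  | case3 pre c rest h ih => rw [pvMysplit, if_neg h]; exact ih

theorem pvBuild_cons (sep a : List Char) (ps : List (List Char)) (h : ps ≠ []) :
    pvBuild sep (a :: ps) = (a ++ sep) :: pvBuild sep ps := by
  match ps, h with
  | b :: ps', _ => simp [pvBuild]

theorem pvG_eq_build (sep : List Char) (hsep : sep ≠ []) (t : List Char) :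
    pvG sep t = pvBuild sep (pvMysplit sep [] t) := by
  induction t using pvG.induct sep with
  | case1 x h => exact absurd h hsep
  | case2 _ i hfind =>
    have hf : PySem.Chars.find [] sep = -1 := hfind
    rw [pvG, dif_neg hsep]
    simp only [dif_pos hf]
    rw [pvMysplit_eq sep hsep [] [], if_pos hf]
    simp [pvBuild]
  | case3 t _ i hfind ht =>
    have hf : PySem.Chars.find t sep = -1 := hfind
    rw [pvG, dif_neg hsep]
    simp only [dif_pos hf]
    rw [pvMysplit_eq sep hsep [] t, if_pos hf]
    simp [pvBuild, ht]
  | case4 t _ i hfind ih =>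
    have hf : ¬ PySem.Chars.find t sep = -1 := hfind
    have hi : i.toNat = (PySem.Chars.find t sep).toNat := rfl
    rw [hi] at ih
    rw [pvG, dif_neg hsep]
    simp only [dif_neg hf]
    rw [pvMysplit_eq sep hsep [] t, if_neg hf]
    have hpos : 0 ≤ PySem.Chars.find t sep := by
      have := PySem.Chars.neg_one_le_find t sep; omega
    obtain ⟨hpre, -⟩ := PySem.Chars.find_spec hpos
    rw [pvBuild_cons _ _ _ (pvMysplit_ne_nil _ _ _), ih]
    have htake : t.take ((PySem.Chars.find t sep).toNat + sep.length)
        = t.take (PySem.Chars.find t sep).toNat ++ sep := by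
      rw [List.take_add]
      congr 1
      exact (List.prefix_iff_eq_take.mp hpre).symm
    simp [htake]

theorem pvALoop_eq (s sep : List Char) (hsep : sep ≠ []) (n : Nat) (hn : n ≤ s.length)
    (fuel : Nat) (hf : s.length - n < fuel) (pieces : List (List Char)) :
    (let res := pvALoop s sep fuel pieces (n : Int);
     if res.2 < (s.length : Int) then res.1 ++ [PySem.Chars.slice s (some res.2) none] else res.1)
      = pieces ++ pvG sep (s.drop n) := by
  induction fuel generalizing n pieces with
  | zero => omega
  | succ f ih =>
    rw [pvALoop]
    simp only [PySem.Chars.slice_eq_listSlice]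
    rw [PySem.Chars.findFrom_natCast s sep n hn]
    by_cases hftn : PySem.Chars.find (s.drop n) sep = -1
    · rw [hftn]
      simp only [reduceIte]
      by_cases hlt : n < s.length
      · rw [if_pos (show (n : Int) < (s.length : Int) by exact_mod_cast hlt)]
        rw [pvG, dif_neg hsep]
        simp only [dif_pos hftn]
        have hne : s.drop n ≠ [] := by
          intro h
          have := congrArg List.length h
          simp at this; omega
        rw [if_neg hne, PySem.List.slice_from s (by positivity)]
        simp
      · have hn' : n = s.length := by omega
        rw [if_neg (by exact_mod_cast (by omega : ¬ (n : Int) < (s.length : Int)))]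
        rw [pvG, dif_neg hsep]
        simp only [dif_pos hftn]
        rw [if_pos (by subst hn'; simp)]
        simp
    · have hpos : 0 ≤ PySem.Chars.find (s.drop n) sep := by
        have := PySem.Chars.neg_one_le_find (s.drop n) sep; omega
      obtain ⟨i, hival⟩ : ∃ i : Nat, PySem.Chars.find (s.drop n) sep = (i : Int) :=
        ⟨(PySem.Chars.find (s.drop n) sep).toNat, by omega⟩
      have hsp : 0 < sep.length := List.length_pos_iff.mpr hsep
      obtain ⟨hpre, -⟩ := PySem.Chars.find_spec hpos
      rw [hival] at hpre
      simp only [Int.toNat_natCast] at hpre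
      have hlen : i + sep.length ≤ s.length - n := by
        have h1 := hpre.length_le
        simp [List.length_drop] at h1
        omega
      rw [hival]
      have hne2 : ¬ ((if (i : Int) = -1 then -1 else (n : Int) + (i : Int)) = -1) := by
        rw [if_neg (by omega)]; omega
      rw [if_neg hne2, if_neg (by omega : ¬ (i : Int) = -1)]
      have hcast : (n : Int) + (i : Int) + (sep.length : Int) = ((n + i + sep.length : Nat) : Int) := by
        push_cast; ring
      rw [hcast]
      have hrec := ih (n + i + sep.length) (by omega) (by omega)
        (pieces ++ [PySem.List.slice s (some (n : Int)) (some ((n + i + sep.length : Nat) : Int))])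
      simp only [PySem.Chars.slice_eq_listSlice] at hrec
      rw [hrec]
      conv_rhs => rw [pvG]
      rw [dif_neg hsep]
      simp only [dif_neg hftn]
      rw [hival]
      simp only [Int.toNat_natCast]
      have hslice : PySem.List.slice s (some (n : Int)) (some ((n + i + sep.length : Nat) : Int))
          = (s.drop n).take (i + sep.length) := by
        rw [PySem.List.slice_natCast]
        congr 1
        omega
      rw [hslice]
      have hdrop : List.drop (i + sep.length) (List.drop n s)
          = List.drop (n + i + sep.length) s := by
        rw [List.drop_drop]; congr 1; omega
      rw [hdrop]
      simp

-- ===== VERDICT (by name: the statement is the Claim_ definition above) =====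
theorem split_with_separator_py_spec : Claim_equal_split_with_separator_py := by
  intro text separator _
  unfold Spec_split_with_separator_py split_with_separator_py split_with_separator_py_alt
  by_cases hsep : separator = ""
  · simp [hsep]
  · have hsl : separator.toList ≠ [] := by
      intro h; apply hsep; ext : 1; simpa using congrArg String.ofList h
    simp only [if_neg hsep]
    have h1 := pvALoop_eq text.toList separator.toList hsl 0 (Nat.zero_le _)
      (text.toList.length + 1) (by omega) []
    simp only [List.drop_zero, Nat.cast_zero, List.nil_append] at h1
    rw [h1, pvG_eq_build _ hsl, pvSplitOn_eq _ hsl]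
    rfl
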